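-- pv_equiv track=rewrite | github.com/zlijingtao/Neurobfuscator | trace_gen/func_gen_cifar.py | mlp_list_from_string
-- ===== SOURCE A (Python) =====
-- def mlp_list_from_string(model_name):
--     size_list = []
--     layer_list = model_name.split("_")
--     start = 0
--     fc_bn = False
--     for i in range(len(layer_list)):
--         if "mlp" in layer_list[i]:
--             start = 1
--         elif start == 1:
--             if "bn" in layer_list[i]:
--                 if "bn1" in layer_list[i]:
--                     fc_bn = True
--                 else:
--                     fc_bn = False
--             else:
--                 size_list.append(layer_list[i])
--
--     return size_list, fc_bn
-- ===== SOURCE B (Python) =====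
-- def mlp_list_from_string(model_name):
--     # Right-to-left structural recursion: tail_info builds the size list
--     # back-to-front and resolves the last-bn-token flag as the first bn
--     # token seen from the right; seek recurses to the first mlp token.
--     def tail_info(ts):
--         if not ts:
--             return [], None
--         sizes, bn = tail_info(ts[1:])
--         t = ts[0]
--         if "mlp" in t:
--             return sizes, bn
--         if "bn" in t:
--             return sizes, bn if bn is not None else ("bn1" in t)
--         return [t] + sizes, bn
--
--     def seek(ts):
--         if not ts:
--             return [], False
--         if "mlp" in ts[0]:
--             sizes, bn = tail_info(ts[1:])
--             return sizes, (bn if bn is not None else False)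
--         return seek(ts[1:])
--
--     return seek(model_name.split("_"))
-- ===== Notes on version B (the rewrite author's own statement) =====
-- stated objective: alternative
-- what changed: Replaces A's left-to-right stateful flag-driven loop with two pure structural recursions: seek recurses down to the first mlp token, and tail_info traverses the tail right-to-left, building the size list back-to-front and resolving the bn flag as the first bn token seen from the right (last-wins without any mutable state).
import Mathlib
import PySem

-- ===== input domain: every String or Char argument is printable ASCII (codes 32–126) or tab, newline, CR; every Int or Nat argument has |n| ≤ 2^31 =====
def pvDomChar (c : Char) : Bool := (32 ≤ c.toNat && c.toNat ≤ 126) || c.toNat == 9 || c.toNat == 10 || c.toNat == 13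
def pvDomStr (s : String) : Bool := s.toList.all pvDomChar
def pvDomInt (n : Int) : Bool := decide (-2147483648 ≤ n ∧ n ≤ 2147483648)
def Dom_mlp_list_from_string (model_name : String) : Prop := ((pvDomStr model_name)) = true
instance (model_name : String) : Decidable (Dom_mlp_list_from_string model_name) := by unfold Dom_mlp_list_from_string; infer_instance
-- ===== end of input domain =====

-- B replaces A's stateful left-to-right flag loop by two pure structural recursions
-- (seek to the first mlp token, then a right-to-left recursion building the size list
-- back-to-front); objective: alternative decomposition. Return values only; no mutation.

-- ===== PORT A =====
-- one loop step of A's for-loop; state = (size_list, start, fc_bn)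
def aStep (s : List String × Int × Bool) (t : String) : List String × Int × Bool :=
  if PySem.Str.isIn "mlp" t then (s.1, 1, s.2.2)
  else if s.2.1 = 1 then
    if PySem.Str.isIn "bn" t then
      if PySem.Str.isIn "bn1" t then (s.1, s.2.1, true)
      else (s.1, s.2.1, false)
    else (s.1 ++ [t], s.2.1, s.2.2)
  else s

def mlp_list_from_string (model_name : String) : List String × Bool :=
  let layer_list := (PySem.Str.split? model_name "_").getD []
  let st := layer_list.foldl aStep ([], 0, false)
  (st.1, st.2.2)

-- ===== PORT B =====
-- tail_info: right-to-left recursion over the tokens after the first mlp token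
def bTailInfo : List String → List String × Option Bool
  | [] => ([], none)
  | t :: rest =>
    let r := bTailInfo rest
    if PySem.Str.isIn "mlp" t then r
    else if PySem.Str.isIn "bn" t then (r.1, some (r.2.getD (PySem.Str.isIn "bn1" t)))
    else (t :: r.1, r.2)

-- seek: recurse down to the first mlp token
def bSeek : List String → List String × Bool
  | [] => ([], false)
  | t :: rest =>
    if PySem.Str.isIn "mlp" t then
      let r := bTailInfo rest
      (r.1, r.2.getD false)
    else bSeek rest

def mlp_list_from_string_alt (model_name : String) : List String × Bool :=
  bSeek ((PySem.Str.split? model_name "_").getD [])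

-- ===== PRECONDITION & SPEC =====
def Spec_mlp_list_from_string (model_name : String) (out : List String × Bool) : Prop := out = mlp_list_from_string_alt model_name
instance (model_name : String) (out : List String × Bool) : Decidable (Spec_mlp_list_from_string model_name out) := by unfold Spec_mlp_list_from_string; infer_instance

-- ===== CLAIM (what is proved, stated in full; the proofs are below) =====
def Claim_equal_mlp_list_from_string : Prop := ∀ (model_name : String), Dom_mlp_list_from_string model_name → Spec_mlp_list_from_string model_name (mlp_list_from_string model_name)

-- ===== LEMMAS AND PROOFS =====

-- phase 2: once start = 1, A's fold appends the non-bn tokens and tracks the last bn token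
theorem phase2 (ts : List String) (sl : List String) (bn : Bool) :
    ts.foldl aStep (sl, 1, bn)
      = (sl ++ (bTailInfo ts).1, 1, ((bTailInfo ts).2).getD bn) := by
  induction ts generalizing sl bn with
  | nil => simp [bTailInfo]
  | cons t rest ih =>
    by_cases hm : PySem.Chars.isIn ['m', 'l', 'p'] t.toList = true
    · have h1 : aStep (sl, 1, bn) t = (sl, 1, bn) := by simp [aStep, hm]
      rw [List.foldl_cons, h1, ih]
      simp [bTailInfo, hm]
    · by_cases hb : PySem.Chars.isIn ['b', 'n'] t.toList = true
      · have h1 : aStep (sl, 1, bn) t = (sl, 1, PySem.Chars.isIn ['b', 'n', '1'] t.toList) := by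
          by_cases h2 : PySem.Chars.isIn ['b', 'n', '1'] t.toList = true <;>
            simp [aStep, hm, hb, h2]
        rw [List.foldl_cons, h1, ih]
        cases hr : (bTailInfo rest).2 <;> simp [bTailInfo, hm, hb, hr]
      · have h1 : aStep (sl, 1, bn) t = (sl ++ [t], 1, bn) := by simp [aStep, hm, hb]
        rw [List.foldl_cons, h1, ih]
        simp [bTailInfo, hm, hb]

-- phase 1: A's fold in state start = 0 matches bSeek
theorem fold_eq (ts : List String) :
    ((ts.foldl aStep ([], 0, false)).1, (ts.foldl aStep ([], 0, false)).2.2) = bSeek ts := by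
  induction ts with
  | nil => simp [bSeek]
  | cons t rest ih =>
    by_cases hm : PySem.Chars.isIn ['m', 'l', 'p'] t.toList = true
    · have h1 : aStep ([], 0, false) t = ([], 1, false) := by simp [aStep, hm]
      rw [List.foldl_cons, h1, phase2]
      simp [bSeek, hm]
    · have h1 : aStep ([], 0, false) t = ([], 0, false) := by simp [aStep, hm]
      rw [List.foldl_cons, h1, ih]
      simp [bSeek, hm]

-- ===== VERDICT (by name: the statement is the Claim_ definition above) =====
theorem mlp_list_from_string_spec : Claim_equal_mlp_list_from_string := by
  intro model_name _
  unfold Spec_mlp_list_from_string mlp_list_from_string mlp_list_from_string_alt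
  exact fold_eq ((PySem.Str.split? model_name "_").getD [])
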